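-- pv_equiv track=rewrite | github.com/chlcken2/python-morph-analysis | __pycache__/extension/docs/word_to_en_docs.py | footer_point_idx
-- ===== SOURCE A (Python) =====
-- def footer_point_idx(whole_list, last_idx):
--     modified_result = []
--     for idx in range(len(whole_list)):
--         if idx >= last_idx:  # first_idx = 1
--             modified_result.append('')
--         else:
--             modified_result.append(whole_list[idx])
--     return modified_result
-- ===== SOURCE B (Python) =====
-- def footer_point_idx(whole_list, last_idx):
--     n = max(0, min(last_idx, len(whole_list)))
--     return whole_list[:n] + [''] * (len(whole_list) - n)
-- ===== Notes on version B (the rewrite author's own statement) =====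
-- stated objective: simpler
-- what changed: Replaces the per-element loop with an index comparison by a single clamped split point n and two bulk pieces: whole_list[:n] plus a replicated blank tail.
import Mathlib
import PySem

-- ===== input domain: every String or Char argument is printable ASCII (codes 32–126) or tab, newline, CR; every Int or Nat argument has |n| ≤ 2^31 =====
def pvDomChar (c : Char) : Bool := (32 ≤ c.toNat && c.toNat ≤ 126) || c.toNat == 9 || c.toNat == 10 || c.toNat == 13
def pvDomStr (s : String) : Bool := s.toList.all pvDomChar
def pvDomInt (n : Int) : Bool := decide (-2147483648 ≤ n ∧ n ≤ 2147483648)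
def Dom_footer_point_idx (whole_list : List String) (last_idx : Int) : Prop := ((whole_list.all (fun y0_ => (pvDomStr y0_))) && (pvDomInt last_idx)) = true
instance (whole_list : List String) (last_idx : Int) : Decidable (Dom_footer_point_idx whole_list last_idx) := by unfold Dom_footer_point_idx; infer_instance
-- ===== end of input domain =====

-- B replaces A's per-element loop (index comparison at every position) with a clamped
-- split point n and two bulk pieces: whole_list[:n] ++ [''] * (len - n). Objective: simpler.

-- ===== PORT A =====
-- the for-loop over range(len(whole_list)), appending '' or whole_list[idx] to the accumulator
def footer_point_idx (whole_list : List String) (last_idx : Int) : List String :=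
  (PySem.List.pyRange 0 whole_list.length 1).foldl
    (fun modified_result idx =>
      if last_idx ≤ idx then modified_result ++ [""]
      else modified_result ++ [PySem.List.pyGetD whole_list idx ""]) []

-- ===== PORT B =====
def footer_point_idx_alt (whole_list : List String) (last_idx : Int) : List String :=
  let n : Nat := (max 0 (min last_idx (whole_list.length : Int))).toNat
  whole_list.take n ++ List.replicate (whole_list.length - n) ""

-- ===== PRECONDITION & SPEC =====
def Spec_footer_point_idx (whole_list : List String) (last_idx : Int) (out : List String) : Prop := out = footer_point_idx_alt whole_list last_idx
instance (whole_list : List String) (last_idx : Int) (out : List String) : Decidable (Spec_footer_point_idx whole_list last_idx out) := by unfold Spec_footer_point_idx; infer_instance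

-- ===== CLAIM (what is proved, stated in full; the proofs are below) =====
def Claim_equal_footer_point_idx : Prop := ∀ (whole_list : List String) (last_idx : Int), Dom_footer_point_idx whole_list last_idx → Spec_footer_point_idx whole_list last_idx (footer_point_idx whole_list last_idx)

-- ===== LEMMAS AND PROOFS =====

-- the append-only foldl builds init ++ the mapped list
theorem pv_foldl_append_map {α β : Type} (f : α → β) (l : List α) (init : List β) :
    l.foldl (fun acc x => acc ++ [f x]) init = init ++ l.map f := by
  induction l generalizing init with
  | nil => simp
  | cons x xs ih => simp [List.foldl, ih]

theorem pv_portA_eq_map (whole_list : List String) (last_idx : Int) :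
    footer_point_idx whole_list last_idx =
      (PySem.List.pyRange 0 whole_list.length 1).map
        (fun idx => if last_idx ≤ idx then "" else PySem.List.pyGetD whole_list idx "") := by
  unfold footer_point_idx
  rw [show (fun (modified_result : List String) (idx : Int) =>
        if last_idx ≤ idx then modified_result ++ [""]
        else modified_result ++ [PySem.List.pyGetD whole_list idx ""]) =
      (fun acc idx => acc ++ [if last_idx ≤ idx then "" else PySem.List.pyGetD whole_list idx ""])
    from by funext a i; split <;> rfl]
  simpa using pv_foldl_append_map _ _ []

-- ===== VERDICT (by name: the statement is the Claim_ definition above) =====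
theorem footer_point_idx_spec : Claim_equal_footer_point_idx := by
  intro xs k _
  unfold Spec_footer_point_idx footer_point_idx_alt
  rw [pv_portA_eq_map]
  apply List.ext_getElem
  · simp [PySem.List.length_pyRange_one]
  · intro i h1 h2
    have hi : i < xs.length := by
      simpa [PySem.List.length_pyRange_one] using h1
    have hn : ((max 0 (min k (xs.length : Int))).toNat) ≤ xs.length := by omega
    rw [List.getElem_map, PySem.List.getElem_pyRange_one]
    by_cases hk : k ≤ (i : Int)
    · have hge : ¬ i < (max 0 (min k (xs.length : Int))).toNat := by omega
      simp [hk, List.length_take, hn, hge]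
    · have hlt : i < (max 0 (min k (xs.length : Int))).toNat := by omega
      simp [hk, List.length_take, hlt,
        PySem.List.pyGetD_eq_getElem, hi]
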